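-- pv_equiv track=rewrite | github.com/YichenNie/ichw | pyassign3/tile_ver_2.5_timetest_Docklet.py | basetile
-- ===== SOURCE A (Python) =====
-- def basetile(x, y, z, t):
--
--     m = []
--     n = []
--     o = []
--
--     for i in range(z):
--         for j in range(t):
--             m.append(i*x + j)
--             n.append(j*x + i)
--
--     m.sort()
--     n.sort()
--
--     if m[-1] < x*y and len(list(set(m))) == len(m):  # 不加最后一个判断条件，运行(2, 3, 2, 3)给出(0, 1, 2, 2, 3, 4)
--         o.append(m)
--     if n[-1] < x*y and m != n and len(list(set(n))) == len(n):
--         o.append(n)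
--
--     return o
-- ===== SOURCE B (Python) =====
-- def _row(x, z, t):
--     # Sorted [i*x+j for i in range(z), j in range(t)] without sorting,
--     # or None when the multiset has duplicates.
--     if z == 1 or x >= t:
--         return [i * x + j for i in range(z) for j in range(t)]
--     if x <= -t:
--         return [i * x + j for i in range(z - 1, -1, -1) for j in range(t)]
--     return None  # z >= 2 and -t < x < t: duplicate values exist
--
--
-- def basetile(x, y, z, t):
--     m = _row(x, z, t)
--     n = _row(x, t, z)
--     o = []
--     if m is not None and m[-1] < x * y:
--         o.append(m)
--     if n is not None and n[-1] < x * y and m != n: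
--         o.append(n)
--     return o
-- ===== Notes on version B (the rewrite author's own statement) =====
-- stated objective: faster
-- what changed: Instead of materialising both z*t grids and sorting them, B decides uniqueness by a closed-form bound on x (duplicates exist iff z>=2 and -t<x<t) and, in the unique cases, emits each grid already in sorted order in a single pass (row-major for x>=t or z=1, reversed row order for x<=-t), skipping generation entirely in the duplicate case.
import Mathlib
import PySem

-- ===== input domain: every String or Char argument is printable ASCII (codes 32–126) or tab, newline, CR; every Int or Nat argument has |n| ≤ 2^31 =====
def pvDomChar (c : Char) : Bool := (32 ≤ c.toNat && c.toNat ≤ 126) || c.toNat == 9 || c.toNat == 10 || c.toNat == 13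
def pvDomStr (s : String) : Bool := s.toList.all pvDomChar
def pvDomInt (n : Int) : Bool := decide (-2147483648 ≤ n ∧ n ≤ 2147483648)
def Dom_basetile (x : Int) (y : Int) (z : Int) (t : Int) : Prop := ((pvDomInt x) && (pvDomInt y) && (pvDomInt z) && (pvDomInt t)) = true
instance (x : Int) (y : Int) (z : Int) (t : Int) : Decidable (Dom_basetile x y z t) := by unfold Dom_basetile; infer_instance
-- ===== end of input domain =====

-- B generates each candidate list already sorted in one pass (or reports the
-- duplicate case directly from a bound on x) instead of building and sorting both lists.

-- ===== PORT A =====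
-- m.sort() : Python's stable ascending sort of an int list, ported as the standard
-- library's stable List.mergeSort (exact: same stable ascending order)
def pySortInts (l : List Int) : List Int := l.mergeSort (fun a b => decide (a ≤ b))
-- one step of counting distinct values along a list in which equal values are adjacent
def setLenGo (acc : Nat × Option Int) (v : Int) : Nat × Option Int :=
  if acc.2 = some v then acc else (acc.1 + 1, some v)
-- len(set(l)) : A applies it to an already sorted l, where duplicates are adjacent,
-- so the number of distinct values is counted exactly by one adjacent-compare pass
def pySetLen (l : List Int) : Nat := (l.foldl setLenGo (0, none)).1

def basetile (x : Int) (y : Int) (z : Int) (t : Int) : List (List Int) :=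
  -- for i in range(z): for j in range(t): m.append(i*x + j); n.append(j*x + i)
  -- (each append modelled by an O(1) cons; the two lists are reversed once at loop end)
  let mn : List Int × List Int :=
    (PySem.List.pyRange 0 z 1).foldl (fun p i =>
      (PySem.List.pyRange 0 t 1).foldl (fun q j => ((i*x + j) :: q.1, (j*x + i) :: q.2)) p)
      ([], [])
  let m := pySortInts mn.1.reverse
  let n := pySortInts mn.2.reverse
  let o : List (List Int) := []
  -- m[-1] / n[-1] raise IndexError when z ≤ 0 or t ≤ 0; Pre_basetile excludes that
  let o := if PySem.List.pyGetD m (-1) 0 < x * y ∧ pySetLen m = m.length then o ++ [m] else o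
  let o := if PySem.List.pyGetD n (-1) 0 < x * y ∧ m ≠ n ∧ pySetLen n = n.length then o ++ [n] else o
  o

-- ===== PORT B =====
def rowAlt (x : Int) (z : Int) (t : Int) : Option (List Int) :=
  if z = 1 ∨ x ≥ t then
    some ((PySem.List.pyRange 0 z 1).flatMap fun i => (PySem.List.pyRange 0 t 1).map fun j => i*x + j)
  else if x ≤ -t then
    some ((PySem.List.pyRange (z-1) (-1) (-1)).flatMap fun i => (PySem.List.pyRange 0 t 1).map fun j => i*x + j)
  else none

def basetile_alt (x : Int) (y : Int) (z : Int) (t : Int) : List (List Int) :=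
  let m := rowAlt x z t
  let n := rowAlt x t z
  let o : List (List Int) := []
  let o := match m with
    | some l => if PySem.List.pyGetD l (-1) 0 < x * y then o ++ [l] else o
    | none => o
  let o := match n with
    | some l => if PySem.List.pyGetD l (-1) 0 < x * y ∧ m ≠ n then o ++ [l] else o
    | none => o
  o

-- ===== PRECONDITION & SPEC =====
-- Pre_ excludes z ≤ 0 or t ≤ 0, where the Python A raises IndexError on m[-1]
def Pre_basetile (x : Int) (y : Int) (z : Int) (t : Int) : Prop := 1 ≤ z ∧ 1 ≤ t
instance (x : Int) (y : Int) (z : Int) (t : Int) : Decidable (Pre_basetile x y z t) := by unfold Pre_basetile; infer_instance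
def pvWitness_basetile : Int × Int × Int × Int := (3, 5, 2, 2)

def Spec_basetile (x : Int) (y : Int) (z : Int) (t : Int) (out : List (List Int)) : Prop := out = basetile_alt x y z t
instance (x : Int) (y : Int) (z : Int) (t : Int) (out : List (List Int)) : Decidable (Spec_basetile x y z t out) := by unfold Spec_basetile; infer_instance

-- ===== CLAIM (what is proved, stated in full; the proofs are below) =====
def Claim_equal_basetile : Prop := ∀ (x : Int) (y : Int) (z : Int) (t : Int), Dom_basetile x y z t → Pre_basetile x y z t → Spec_basetile x y z t (basetile x y z t)

-- ===== LEMMAS AND PROOFS =====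

-- the multiset A builds as m (and, transposed, as n), written as B generates it
def gridA (x z t : Int) : List Int :=
  (PySem.List.pyRange 0 z 1).flatMap fun i => (PySem.List.pyRange 0 t 1).map fun j => i*x + j
def gridB (x z t : Int) : List Int :=
  (PySem.List.pyRange (z-1) (-1) (-1)).flatMap fun i => (PySem.List.pyRange 0 t 1).map fun j => i*x + j

theorem foldl_pair_cons (r : List Int) (f g : Int → Int) (p : List Int × List Int) :
    r.foldl (fun q j => (f j :: q.1, g j :: q.2)) p = ((r.map f).reverse ++ p.1, (r.map g).reverse ++ p.2) := by
  induction r generalizing p with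
  | nil => simp
  | cons a r ih =>
    rw [List.foldl_cons, ih]
    simp

theorem foldl_pair_flatMap (l r : List Int) (F G : Int → Int → Int) :
    l.foldl (fun p i => r.foldl (fun q j => (F i j :: q.1, G i j :: q.2)) p) ([], []) =
      ((l.flatMap fun i => r.map (F i)).reverse, (l.flatMap fun i => r.map (G i)).reverse) := by
  suffices h : ∀ (p : List Int × List Int),
      l.foldl (fun p i => r.foldl (fun q j => (F i j :: q.1, G i j :: q.2)) p) p =
        ((l.flatMap fun i => r.map (F i)).reverse ++ p.1, (l.flatMap fun i => r.map (G i)).reverse ++ p.2) by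
    simpa using h ([], [])
  induction l with
  | nil => intro p; simp
  | cons a l ih =>
    intro p
    rw [List.foldl_cons, foldl_pair_cons, ih]
    simp

theorem flatMap_map_transpose (l r : List Int) (f : Int → Int → Int) :
    (l.flatMap fun i => r.map (f i)).Perm (r.flatMap fun j => l.map fun i => f i j) := by
  apply Multiset.coe_eq_coe.mp
  rw [← Multiset.coe_bind, ← Multiset.coe_bind]
  calc ((l : Multiset Int).bind fun i => ((r.map (f i) : List Int) : Multiset Int))
      = (l : Multiset Int).bind (fun i => (r : Multiset Int).map (f i)) := by
        simp [← Multiset.map_coe]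
    _ = (l : Multiset Int).bind (fun i => (r : Multiset Int).bind (fun j => {f i j})) := by
        simp [Multiset.bind_singleton]
    _ = (r : Multiset Int).bind (fun j => (l : Multiset Int).bind (fun i => {f i j})) :=
        Multiset.bind_bind _ _
    _ = (r : Multiset Int).bind (fun j => (l : Multiset Int).map (fun i => f i j)) := by
        simp [Multiset.bind_singleton]
    _ = (r : Multiset Int).bind (fun j => ((l.map fun i => f i j : List Int) : Multiset Int)) := by
        simp [← Multiset.map_coe]

theorem pySortInts_pairwise (l : List Int) : (pySortInts l).Pairwise (· ≤ ·) := by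
  have h := List.pairwise_mergeSort (le := fun a b : Int => decide (a ≤ b))
    (trans := by intro a b c hab hbc; simp at hab hbc ⊢; omega)
    (total := by intro a b; simp; omega) l
  exact h.imp (by simp)

theorem pySortInts_perm (l : List Int) : (pySortInts l).Perm l :=
  List.mergeSort_perm l _

theorem pySortInts_eq_of_perm_of_pairwise_lt (l L : List Int) (h : L.Perm l)
    (hpw : L.Pairwise (· < ·)) : pySortInts l = L :=
  PySem.List.eq_of_perm_of_pairwise_le ((pySortInts_perm l).trans h.symm)
    (pySortInts_pairwise l) (hpw.imp (fun h => le_of_lt h))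

theorem pySortInts_congr_perm (l1 l2 : List Int) (h : l1.Perm l2) :
    pySortInts l1 = pySortInts l2 :=
  PySem.List.eq_of_perm_of_pairwise_le
    ((pySortInts_perm l1).trans (h.trans (pySortInts_perm l2).symm))
    (pySortInts_pairwise l1) (pySortInts_pairwise l2)

theorem gridA_pairwise (x z t : Int) (h : z = 1 ∨ t ≤ x) : (gridA x z t).Pairwise (· < ·) := by
  unfold gridA
  rw [List.flatMap_def]
  apply List.pairwise_flatten.mpr
  refine ⟨?_, ?_⟩
  · intro blk hblk
    simp only [List.mem_map] at hblk
    obtain ⟨i, _, rfl⟩ := hblk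
    refine List.pairwise_map.mpr ?_
    exact (PySem.List.pairwise_lt_pyRange_one 0 t).imp (by omega)
  · refine List.pairwise_map.mpr ?_
    refine List.Pairwise.imp_of_mem ?_ (PySem.List.pairwise_lt_pyRange_one 0 z)
    intro i i' hi hi' hlt u hu v hv
    rw [PySem.List.mem_pyRange_one] at hi hi'
    simp only [List.mem_map, PySem.List.mem_pyRange_one] at hu hv
    obtain ⟨j, hj, rfl⟩ := hu
    obtain ⟨j', hj', rfl⟩ := hv
    rcases h with h1 | h1
    · omega
    · have hx0 : 0 ≤ x := by omega
      have hstep : x ≤ (i' - i) * x := by nlinarith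
      nlinarith

theorem gridB_pairwise (x z t : Int) (h : x ≤ -t) : (gridB x z t).Pairwise (· < ·) := by
  unfold gridB
  rw [List.flatMap_def]
  apply List.pairwise_flatten.mpr
  refine ⟨?_, ?_⟩
  · intro blk hblk
    simp only [List.mem_map] at hblk
    obtain ⟨i, _, rfl⟩ := hblk
    refine List.pairwise_map.mpr ?_
    exact (PySem.List.pairwise_lt_pyRange_one 0 t).imp (by omega)
  · refine List.pairwise_map.mpr ?_
    have hpw : (PySem.List.pyRange (z-1) (-1) (-1)).Pairwise (· > ·) := by
      rw [PySem.List.pyRange_neg_one_eq_reverse]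
      exact List.pairwise_reverse.mpr (PySem.List.pairwise_lt_pyRange_one _ _)
    refine List.Pairwise.imp_of_mem ?_ hpw
    intro i i' hi hi' hgt u hu v hv
    simp only [List.mem_map, PySem.List.mem_pyRange_one] at hu hv
    obtain ⟨j, hj, rfl⟩ := hu
    obtain ⟨j', hj', rfl⟩ := hv
    have hstep : t ≤ (i' - i) * x := by nlinarith
    nlinarith

theorem gridB_perm_gridA (x z t : Int) : (gridB x z t).Perm (gridA x z t) := by
  unfold gridA gridB
  rw [PySem.List.pyRange_neg_one_eq_reverse]
  have h : ((-1 : Int) + 1) = 0 := by norm_num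
  rw [h]
  have h2 : (z - 1 + 1) = z := by ring
  rw [h2]
  exact List.Perm.flatMap_right _ (List.reverse_perm _)

theorem gridA_not_nodup (x z t : Int) (hz : 2 ≤ z) (h1 : -t < x) (h2 : x < t) :
    ¬ (gridA x z t).Nodup := by
  intro hnd
  unfold gridA at hnd
  rw [List.flatMap_def] at hnd
  have hcross := (List.pairwise_flatten.mp hnd).2
  rw [List.pairwise_map] at hcross
  have hz01 : PySem.List.pyRange 0 z 1 = 0 :: 1 :: PySem.List.pyRange 2 z 1 := by
    rw [PySem.List.pyRange_one_cons (by omega), PySem.List.pyRange_one_cons (by omega)]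
    norm_num
  rw [hz01] at hcross
  have h01 := (List.pairwise_cons.mp hcross).1 1 (by simp)
  by_cases hx : 0 ≤ x
  · exact h01 (0*x + x) (by
      simp only [List.mem_map, PySem.List.mem_pyRange_one]
      exact ⟨x, ⟨hx, h2⟩, rfl⟩) (1*x + 0) (by
      simp only [List.mem_map, PySem.List.mem_pyRange_one]
      exact ⟨0, ⟨le_refl 0, by omega⟩, rfl⟩) (by ring)
  · exact h01 (0*x + 0) (by
      simp only [List.mem_map, PySem.List.mem_pyRange_one]
      exact ⟨0, ⟨le_refl 0, by omega⟩, rfl⟩) (1*x + (-x)) (by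
      simp only [List.mem_map, PySem.List.mem_pyRange_one]
      exact ⟨-x, ⟨by omega, by omega⟩, rfl⟩) (by ring)

theorem setLenGo_fst_le (l : List Int) : ∀ (s : Nat × Option Int),
    (l.foldl setLenGo s).1 ≤ s.1 + l.length := by
  induction l with
  | nil => intro s; simp
  | cons a l ih =>
    intro s
    rw [List.foldl_cons]
    have h := ih (setLenGo s a)
    have hle : (setLenGo s a).1 ≤ s.1 + 1 := by
      unfold setLenGo; split <;> simp
    simp only [List.length_cons]
    omega

theorem setLenGo_eq_self (s : Nat × Option Int) (v : Int) (h : s.2 = some v) :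
    setLenGo s v = s := by
  unfold setLenGo
  rw [if_pos h]

theorem setLenGo_snd (s : Nat × Option Int) (v : Int) : (setLenGo s v).2 = some v := by
  unfold setLenGo
  split
  · assumption
  · rfl

theorem setLenGo_full (l : List Int) : ∀ (s : Nat × Option Int), l.Pairwise (· < ·) →
    (∀ v ∈ l, s.2 ≠ some v) → (l.foldl setLenGo s).1 = s.1 + l.length := by
  induction l with
  | nil => intro s _ _; simp
  | cons a l ih =>
    intro s hpw hne
    rw [List.foldl_cons]
    have hgo : setLenGo s a = (s.1 + 1, some a) := by
      unfold setLenGo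
      rw [if_neg (hne a (by simp))]
    rw [hgo]
    have := ih (s.1 + 1, some a) (List.pairwise_cons.mp hpw).2 (by
      intro v hv hcontra
      have hav := (List.pairwise_cons.mp hpw).1 v hv
      simp only [Option.some_inj] at hcontra
      omega)
    simp only [List.length_cons]
    omega

theorem pySetLen_of_pairwise_lt (l : List Int) (hpw : l.Pairwise (· < ·)) :
    pySetLen l = l.length := by
  unfold pySetLen
  rw [setLenGo_full l (0, none) hpw (by intro v _ h; simp at h)]
  simp

theorem exists_adjacent_dup (l : List Int) (hs : l.Pairwise (· ≤ ·)) (hnd : ¬ l.Nodup) :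
    ∃ l1 v l2, l = l1 ++ v :: v :: l2 := by
  induction l with
  | nil => exact absurd List.nodup_nil hnd
  | cons a l ih =>
    cases l with
    | nil => exact absurd (List.nodup_singleton a) hnd
    | cons b l' =>
      by_cases hab : a = b
      · exact ⟨[], a, l', by simp [hab]⟩
      · have htail : ¬ (b :: l').Nodup := by
          intro hndt
          apply hnd
          refine List.nodup_cons.mpr ⟨?_, hndt⟩
          intro hmem
          have hle := (List.pairwise_cons.mp hs).1
          rcases List.mem_cons.mp hmem with h | h
          · exact hab h
          · have hb := (List.pairwise_cons.mp (List.pairwise_cons.mp hs).2).1 a h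
            have hab' := hle b (by simp)
            have : a = b := by omega
            exact hab this
        obtain ⟨l1, v, l2, heq⟩ := ih (List.pairwise_cons.mp hs).2 htail
        exact ⟨a :: l1, v, l2, by simp [heq]⟩

theorem pySetLen_ne_of_dup (l : List Int) (hs : l.Pairwise (· ≤ ·)) (hnd : ¬ l.Nodup) :
    pySetLen l ≠ l.length := by
  obtain ⟨l1, v, l2, rfl⟩ := exists_adjacent_dup l hs hnd
  unfold pySetLen
  have hsplit : l1 ++ v :: v :: l2 = (l1 ++ [v]) ++ v :: l2 := by simp
  rw [hsplit, List.foldl_append, List.foldl_cons]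
  have h1 := setLenGo_fst_le (l1 ++ [v]) (0, none)
  have h2 : ((l1 ++ [v]).foldl setLenGo (0, none)).2 = some v := by
    rw [List.foldl_append]
    exact setLenGo_snd _ v
  rw [setLenGo_eq_self _ _ h2]
  have h3 := setLenGo_fst_le l2 ((l1 ++ [v]).foldl setLenGo (0, none))
  simp only [List.length_append, List.length_cons, List.length_nil] at h1 h3 ⊢
  omega

theorem rowAlt_some (x z t : Int) (L : List Int) (h : rowAlt x z t = some L) :
    pySortInts (gridA x z t) = L ∧ L.Pairwise (· < ·) := by
  unfold rowAlt at h
  split_ifs at h with h1 h2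
  · rw [Option.some_inj] at h
    subst h
    have hpw := gridA_pairwise x z t (by omega)
    exact ⟨pySortInts_eq_of_perm_of_pairwise_lt _ _ (List.Perm.refl _) hpw, hpw⟩
  · rw [Option.some_inj] at h
    subst h
    have hpw := gridB_pairwise x z t h2
    exact ⟨pySortInts_eq_of_perm_of_pairwise_lt _ _ (gridB_perm_gridA x z t) hpw, hpw⟩

theorem rowAlt_none (x z t : Int) (hz : 1 ≤ z) (ht : 1 ≤ t) (h : rowAlt x z t = none) :
    ¬ (gridA x z t).Nodup := by
  unfold rowAlt at h
  split_ifs at h with h1 h2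
  · push_neg at h1 h2
    exact gridA_not_nodup x z t (by omega) (by omega) (by omega)

theorem pySetLen_sort_ne (l : List Int) (hnd : ¬ l.Nodup) :
    pySetLen (pySortInts l) ≠ (pySortInts l).length := by
  apply pySetLen_ne_of_dup _ (pySortInts_pairwise l)
  intro hcontra
  exact hnd (((pySortInts_perm l).nodup_iff).1 hcontra)

-- ===== VERDICT (by name: the statement is the Claim_ definition above) =====
theorem basetile_spec : Claim_equal_basetile := by
  intro x y z t _hdom hpre
  obtain ⟨hz, ht⟩ := hpre
  show basetile x y z t = basetile_alt x y z t
  unfold basetile basetile_alt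
  rw [foldl_pair_flatMap]
  simp only [List.reverse_reverse]
  have hm : pySortInts ((PySem.List.pyRange 0 z 1).flatMap fun i =>
      (PySem.List.pyRange 0 t 1).map fun j => i*x + j) = pySortInts (gridA x z t) := rfl
  have hnperm : ((PySem.List.pyRange 0 z 1).flatMap fun i =>
      (PySem.List.pyRange 0 t 1).map fun j => j*x + i).Perm (gridA x t z) :=
    flatMap_map_transpose _ _ (fun i j => j*x + i)
  have hn : pySortInts ((PySem.List.pyRange 0 z 1).flatMap fun i =>
      (PySem.List.pyRange 0 t 1).map fun j => j*x + i) = pySortInts (gridA x t z) := by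
    exact pySortInts_congr_perm _ _ hnperm
  rw [hm, hn]
  cases hrm : rowAlt x z t with
  | some Lm =>
    obtain ⟨hsm, hpwm⟩ := rowAlt_some x z t Lm hrm
    have hlenm : pySetLen Lm = Lm.length := pySetLen_of_pairwise_lt Lm hpwm
    cases hrn : rowAlt x t z with
    | some Ln =>
      obtain ⟨hsn, hpwn⟩ := rowAlt_some x t z Ln hrn
      have hlenn : pySetLen Ln = Ln.length := pySetLen_of_pairwise_lt Ln hpwn
      simp only [hsm, hsn]
      by_cases hc1 : PySem.List.pyGetD Lm (-1) 0 < x * y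
      · by_cases hc2 : PySem.List.pyGetD Ln (-1) 0 < x * y
        · by_cases hc3 : Lm = Ln <;> simp [hc1, hc2, hc3, hlenm, hlenn]
        · simp [hc1, hc2, hlenm, hlenn]
      · by_cases hc2 : PySem.List.pyGetD Ln (-1) 0 < x * y
        · by_cases hc3 : Lm = Ln <;> simp [hc1, hc2, hc3, hlenm, hlenn]
        · simp [hc1, hc2, hlenm, hlenn]
    | none =>
      have hnn := rowAlt_none x t z ht hz hrn
      have hlenn := pySetLen_sort_ne _ hnn
      simp only [hsm]
      by_cases hc1 : PySem.List.pyGetD Lm (-1) 0 < x * y <;>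
        simp [hc1, hlenm, hlenn]
  | none =>
    have hnm := rowAlt_none x z t hz ht hrm
    have hlenm := pySetLen_sort_ne _ hnm
    cases hrn : rowAlt x t z with
    | some Ln =>
      obtain ⟨hsn, hpwn⟩ := rowAlt_some x t z Ln hrn
      have hlenn : pySetLen Ln = Ln.length := pySetLen_of_pairwise_lt Ln hpwn
      have hndn : Ln.Nodup := hpwn.imp (fun h => ne_of_lt h)
      have hneq : pySortInts (gridA x z t) ≠ Ln := by
        intro heq
        apply hnm
        apply ((pySortInts_perm (gridA x z t)).nodup_iff).1
        rw [heq]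
        exact hndn
      simp only [hsn]
      by_cases hc2 : PySem.List.pyGetD Ln (-1) 0 < x * y <;>
        simp [hc2, hlenm, hlenn, hneq]
    | none =>
      have hnn := rowAlt_none x t z ht hz hrn
      have hlenn := pySetLen_sort_ne _ hnn
      simp [hlenm, hlenn]
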